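-- pv_equiv track=rewrite | github.com/bvandenabbeele/AdventOfCode | 2023/day_02/main.py | part_2
-- ===== SOURCE A (Python) =====
-- def part_2(data):
--     colors = ("red", "green", "blue")
--
--     total = 0
--     for hands in data.values():
--         possible = True
--         mins = [0, 0, 0]
--
--         for hand in hands:
--             for i in range(len(colors)):
--                 try:
--                     mins[i] = max(mins[i], hand[colors[i]])
--
--                 except KeyError:
--                     pass
--
--         if possible:
--             total += mins[0] * mins[1] * mins[2]
--
--     return total
-- ===== SOURCE B (Python) =====
-- def _max_color(hands, color):
--     return max([0] + [hand[color] for hand in hands if color in hand])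
--
--
-- def part_2(data):
--     total = 0
--     for hands in data.values():
--         total += (
--             _max_color(hands, "red")
--             * _max_color(hands, "green")
--             * _max_color(hands, "blue")
--         )
--     return total
-- ===== Notes on version B (the rewrite author's own statement) =====
-- stated objective: simpler
-- what changed: Replaces A's single combined per-hand loop that updates a shared mins[] array via indices and try/except (plus a dead 'possible' flag) with three independent per-color maximum scans (max over a filtered comprehension), multiplied per game.
import Mathlib
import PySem

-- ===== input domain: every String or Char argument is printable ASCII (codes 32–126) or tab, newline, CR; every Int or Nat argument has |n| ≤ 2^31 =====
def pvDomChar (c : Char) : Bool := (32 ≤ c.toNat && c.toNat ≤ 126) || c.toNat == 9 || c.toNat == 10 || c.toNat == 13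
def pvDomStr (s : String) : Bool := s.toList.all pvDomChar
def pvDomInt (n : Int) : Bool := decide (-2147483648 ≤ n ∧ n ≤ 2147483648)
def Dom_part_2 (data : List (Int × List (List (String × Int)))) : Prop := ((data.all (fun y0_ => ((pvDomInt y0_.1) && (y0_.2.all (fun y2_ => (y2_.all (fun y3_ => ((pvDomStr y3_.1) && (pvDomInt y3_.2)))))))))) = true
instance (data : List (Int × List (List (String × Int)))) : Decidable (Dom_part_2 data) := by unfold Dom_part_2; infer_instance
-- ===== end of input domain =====

-- B replaces A's combined per-hand loop over a shared mins[] array (with its try/except and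
-- dead 'possible' flag) by three independent per-color maximum scans; objective: simpler.


-- ===== PORT A =====
-- colors = ("red", "green", "blue")
def colors_part_2 : List String := ["red", "green", "blue"]

-- Python A receives a dict, so the assoc list is materialised via Dict.ofList (last value
-- wins on duplicate keys, insertion order kept), and the loop runs over its values.
-- hand[colors[i]] raising KeyError and being swallowed by 'except KeyError: pass'
-- is the 'none' branch of the match.
def part_2 (data : List (Int × List (List (String × Int)))) : Int :=
  (PySem.Dict.ofList data).values.foldl
    (fun total hands =>
      let possible := true
      let mins := hands.foldl
        (fun mins hand =>
          (PySem.List.pyRange 0 3 1).foldl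
            (fun mins i =>
              match (PySem.Dict.ofList hand).get? (PySem.List.pyGetD colors_part_2 i "") with
              | some v => PySem.List.pySetD mins i (max (PySem.List.pyGetD mins i 0) v)
              | none => mins)
            mins)
        [0, 0, 0]
      if possible then
        total + PySem.List.pyGetD mins 0 0 * PySem.List.pyGetD mins 1 0 * PySem.List.pyGetD mins 2 0
      else total)
    0

-- ===== PORT B =====
-- max([0] + [hand[color] for hand in hands if color in hand]); hand[color] is total here
-- because the filter guarantees the key is present, so getD is exact.
def maxColor_part_2 (hands : List (List (String × Int))) (color : String) : Int :=
  (PySem.List.max?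
    ((0 : Int) ::
      (hands.filter (fun hand => (PySem.Dict.ofList hand).contains color)).map
        (fun hand => (PySem.Dict.ofList hand).getD color 0))
    (fun y => y)).getD 0

def part_2_alt (data : List (Int × List (List (String × Int)))) : Int :=
  (PySem.Dict.ofList data).values.foldl
    (fun total hands =>
      total + maxColor_part_2 hands "red" * maxColor_part_2 hands "green"
                * maxColor_part_2 hands "blue")
    0

-- ===== PRECONDITION & SPEC =====
def Spec_part_2 (data : List (Int × List (List (String × Int)))) (out : Int) : Prop := out = part_2_alt data
instance (data : List (Int × List (List (String × Int)))) (out : Int) : Decidable (Spec_part_2 data out) := by unfold Spec_part_2; infer_instance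

-- ===== CLAIM (what is proved, stated in full; the proofs are below) =====
def Claim_equal_part_2 : Prop := ∀ (data : List (Int × List (List (String × Int)))), Dom_part_2 data → Spec_part_2 data (part_2 data)

-- ===== LEMMAS AND PROOFS =====

-- A's per-hand update of one color slot.
def stepColor (color : String) (m : Int) (hand : List (String × Int)) : Int :=
  match (PySem.Dict.ofList hand).get? color with
  | some v => max m v
  | none => m

theorem pyRange_0_3 : PySem.List.pyRange 0 3 1 = [0, 1, 2] := by decide

-- One hand of A's inner loop, on an explicit 3-slot state.
theorem hand_step (hand : List (String × Int)) (a b c : Int) :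
    (PySem.List.pyRange 0 3 1).foldl
      (fun mins i =>
        match (PySem.Dict.ofList hand).get? (PySem.List.pyGetD colors_part_2 i "") with
        | some v => PySem.List.pySetD mins i (max (PySem.List.pyGetD mins i 0) v)
        | none => mins)
      [a, b, c]
    = [stepColor "red" a hand, stepColor "green" b hand, stepColor "blue" c hand] := by
  rw [pyRange_0_3]
  simp only [List.foldl, stepColor]
  have hr : PySem.List.pyGetD colors_part_2 (0 : Int) "" = "red" := by rfl
  have hg : PySem.List.pyGetD colors_part_2 (1 : Int) "" = "green" := by rfl
  have hb : PySem.List.pyGetD colors_part_2 (2 : Int) "" = "blue" := by rfl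
  rw [hr, hg, hb]
  cases (PySem.Dict.ofList hand).get? "red" <;>
    cases (PySem.Dict.ofList hand).get? "green" <;>
      cases (PySem.Dict.ofList hand).get? "blue" <;> rfl

-- A's whole hands loop computes the three per-color running maxima independently.
theorem mins_fold (hands : List (List (String × Int))) (a b c : Int) :
    hands.foldl
      (fun mins hand =>
        (PySem.List.pyRange 0 3 1).foldl
          (fun mins i =>
            match (PySem.Dict.ofList hand).get? (PySem.List.pyGetD colors_part_2 i "") with
            | some v => PySem.List.pySetD mins i (max (PySem.List.pyGetD mins i 0) v)
            | none => mins)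
          mins)
      [a, b, c]
    = [hands.foldl (stepColor "red") a, hands.foldl (stepColor "green") b,
       hands.foldl (stepColor "blue") c] := by
  induction hands generalizing a b c with
  | nil => rfl
  | cons h t ih => simp only [List.foldl, hand_step, ih]

-- The filtered-comprehension maximum is the same running maximum.
theorem filter_map_foldl_max (hands : List (List (String × Int))) (color : String) (m : Int) :
    ((hands.filter (fun hand => (PySem.Dict.ofList hand).contains color)).map
        (fun hand => (PySem.Dict.ofList hand).getD color 0)).foldl max m
    = hands.foldl (stepColor color) m := by
  induction hands generalizing m with
  | nil => rfl
  | cons h t ih =>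
    simp only [List.filter]
    cases hc : (PySem.Dict.ofList h).get? color with
    | some v =>
      have hct : (PySem.Dict.ofList h).contains color = true := by
        rw [PySem.Dict.contains_eq_isSome_get?, hc]; rfl
      have hs : stepColor color m h = max m ((PySem.Dict.ofList h).getD color 0) := by
        simp [stepColor, hc, PySem.Dict.getD_eq_get?_getD]
      simp only [hct, List.map, List.foldl, ih, hs]
    | none =>
      have hcf : (PySem.Dict.ofList h).contains color = false := by
        rw [PySem.Dict.contains_eq_isSome_get?, hc]; rfl
      have hs : stepColor color m h = m := by simp [stepColor, hc]
      simp only [hcf, List.foldl, ih, hs]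
  
theorem maxColor_eq (hands : List (List (String × Int))) (color : String) :
    maxColor_part_2 hands color = hands.foldl (stepColor color) 0 := by
  unfold maxColor_part_2
  rw [PySem.List.max?_id_cons, Option.getD_some, filter_map_foldl_max]

-- ===== VERDICT (by name: the statement is the Claim_ definition above) =====
theorem part_2_spec : Claim_equal_part_2 := by
  intro data _
  unfold Spec_part_2 part_2 part_2_alt
  have hfun :
      (fun (total : Int) (hands : List (List (String × Int))) =>
        let possible := true
        let mins := hands.foldl
          (fun mins hand =>
            (PySem.List.pyRange 0 3 1).foldl
              (fun mins i =>
                match (PySem.Dict.ofList hand).get? (PySem.List.pyGetD colors_part_2 i "") with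
                | some v => PySem.List.pySetD mins i (max (PySem.List.pyGetD mins i 0) v)
                | none => mins)
              mins)
          [0, 0, 0]
        if possible then
          total + PySem.List.pyGetD mins 0 0 * PySem.List.pyGetD mins 1 0 * PySem.List.pyGetD mins 2 0
        else total)
      = (fun (total : Int) (hands : List (List (String × Int))) =>
          total + maxColor_part_2 hands "red" * maxColor_part_2 hands "green"
                    * maxColor_part_2 hands "blue") := by
    funext total hands
    simp only [mins_fold, maxColor_eq, if_true]
    rfl
  rw [hfun]
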